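-- pv_equiv track=rewrite | github.com/Hedron-Tensor/project-buchannon | src/ai_lifeguard/mcp_guardian.py | _is_name_spoof
-- ===== SOURCE A (Python) =====
-- def _is_name_spoof(name, trusted_names):
--     if not trusted_names:
--         return False
--
--     for trusted in trusted_names:
--         if name == trusted:
--             continue
--         if name.replace("-", "") == trusted.replace("-", ""):
--             return True
--         if name.replace("_", "-") == trusted.replace("_", "-") and name != trusted:
--             return True
--         parts = name.split("/")
--         if len(parts) == 2:
--             trusted_parts = trusted.split("/")
--             if len(trusted_parts) == 2 and parts[1] == trusted_parts[1] and parts[0] != trusted_parts[0]: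
--                 return True
--     return False
-- ===== SOURCE B (Python) =====
-- def _is_name_spoof(name, trusted_names):
--     if not trusted_names:
--         return False
--     others = [t for t in trusted_names if t != name]
--     if name.replace("-", "") in {t.replace("-", "") for t in others}:
--         return True
--     if name.replace("_", "-") in {t.replace("_", "-") for t in others}:
--         return True
--     parts = name.split("/")
--     if len(parts) != 2:
--         return False
--     owners = {tp[0] for tp in (t.split("/") for t in others)
--               if len(tp) == 2 and tp[1] == parts[1]}
--     return bool(owners - {parts[0]})
-- ===== Notes on version B (the rewrite author's own statement) =====
-- stated objective: faster
-- what changed: Replaces A's per-trusted-name loop of three sequential checks (re-splitting name each iteration) with index structures built once over the trusted names differing from name (a set of dash-stripped forms, a set of underscore-to-dash forms, and an owner set for the matching two-part path suffix) answered by membership and set difference.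
import Mathlib
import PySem

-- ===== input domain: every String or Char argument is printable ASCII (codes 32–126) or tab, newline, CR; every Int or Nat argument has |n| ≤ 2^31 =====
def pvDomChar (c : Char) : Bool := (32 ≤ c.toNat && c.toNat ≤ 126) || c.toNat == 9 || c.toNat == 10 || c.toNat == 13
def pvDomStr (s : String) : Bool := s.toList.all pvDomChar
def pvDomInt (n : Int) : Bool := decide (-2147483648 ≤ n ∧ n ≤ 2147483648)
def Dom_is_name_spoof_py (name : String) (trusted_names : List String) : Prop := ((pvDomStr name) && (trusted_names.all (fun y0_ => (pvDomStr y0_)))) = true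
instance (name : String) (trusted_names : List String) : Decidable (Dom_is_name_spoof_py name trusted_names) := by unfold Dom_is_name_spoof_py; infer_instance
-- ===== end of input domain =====

-- B replaces A's per-element loop of three checks (which re-splits name every iteration) by
-- three indexes built once over the non-equal trusted names (two sets of normalised forms plus
-- an owner set for the matching path suffix) queried with membership/difference; the timing
-- run measured B faster (constant-factor: bulk set construction vs per-element checks).

-- ===== PORT A =====
-- the for-loop of _is_name_spoof, one trusted name per step, early return = true
def isnLoopA (name : String) : List String → Bool
  | [] => false
  | t :: rest =>
    if name == t then isnLoopA name rest
    else if PySem.Str.replace name "-" "" == PySem.Str.replace t "-" "" then true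
    else if (PySem.Str.replace name "_" "-" == PySem.Str.replace t "_" "-") && name != t then true
    else
      let parts := (PySem.Str.split? name "/").getD []   -- sep "/" ≠ "": split? is always some
      if parts.length == 2 then
        let trusted_parts := (PySem.Str.split? t "/").getD []
        if (trusted_parts.length == 2) && (parts[1]! == trusted_parts[1]!) && (parts[0]! != trusted_parts[0]!) then true
        else isnLoopA name rest
      else isnLoopA name rest

def is_name_spoof_py (name : String) (trusted_names : List String) : Bool :=
  if trusted_names.isEmpty then false
  else isnLoopA name trusted_names

-- ===== PORT B =====
def is_name_spoof_py_alt (name : String) (trusted_names : List String) : Bool :=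
  if trusted_names.isEmpty then false
  else
    let others := trusted_names.filter (fun t => t != name)
    if PySem.Set.contains (PySem.Set.ofList (others.map (fun t => PySem.Str.replace t "-" "")))
        (PySem.Str.replace name "-" "") then true
    else if PySem.Set.contains (PySem.Set.ofList (others.map (fun t => PySem.Str.replace t "_" "-")))
        (PySem.Str.replace name "_" "-") then true
    else
      let parts := (PySem.Str.split? name "/").getD []   -- sep "/" ≠ "": split? is always some
      if parts.length != 2 then false
      else
        let owners : PySem.Set String := PySem.Set.ofList (others.filterMap (fun t =>
          let tp := (PySem.Str.split? t "/").getD []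
          if tp.length == 2 && tp[1]! == parts[1]! then some tp[0]! else none))
        !(PySem.Set.diff owners (PySem.Set.ofList [parts[0]!])).isEmpty

-- ===== PRECONDITION & SPEC =====
def Spec_is_name_spoof_py (name : String) (trusted_names : List String) (out : Bool) : Prop := out = is_name_spoof_py_alt name trusted_names
instance (name : String) (trusted_names : List String) (out : Bool) : Decidable (Spec_is_name_spoof_py name trusted_names out) := by unfold Spec_is_name_spoof_py; infer_instance

-- ===== CLAIM (what is proved, stated in full; the proofs are below) =====
def Claim_equal_is_name_spoof_py : Prop := ∀ (name : String) (trusted_names : List String), Dom_is_name_spoof_py name trusted_names → Spec_is_name_spoof_py name trusted_names (is_name_spoof_py name trusted_names)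

-- ===== LEMMAS AND PROOFS =====

-- "t spoofs name": what one iteration of A's loop detects for a trusted name t ≠ name
def Spoofs (name t : String) : Prop :=
  t ≠ name ∧
    (PySem.Str.replace name "-" "" = PySem.Str.replace t "-" "" ∨
     PySem.Str.replace name "_" "-" = PySem.Str.replace t "_" "-" ∨
     (((PySem.Str.split? name "/").getD []).length = 2 ∧
      (((PySem.Str.split? t "/").getD []).length = 2 ∧
       ((PySem.Str.split? name "/").getD [])[1]! = (((PySem.Str.split? t "/").getD []))[1]! ∧
       ((PySem.Str.split? name "/").getD [])[0]! ≠ (((PySem.Str.split? t "/").getD []))[0]!)))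

lemma isnLoopA_iff (name : String) (ts : List String) :
    isnLoopA name ts = true ↔ ∃ t ∈ ts, Spoofs name t := by
  induction ts with
  | nil => simp [isnLoopA]
  | cons t rest ih =>
    simp only [isnLoopA, List.mem_cons]
    split_ifs with h1 h2 h3 h4 h5
    · -- name == t
      simp only [beq_iff_eq] at h1
      rw [ih]
      constructor
      · rintro ⟨u, hu, hs⟩; exact ⟨u, Or.inr hu, hs⟩
      · rintro ⟨u, hu | hu, hs⟩
        · subst hu; exact absurd h1.symm hs.1
        · exact ⟨u, hu, hs⟩
    · simp only [beq_iff_eq] at h1 h2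
      simp only [true_iff]
      exact ⟨t, Or.inl rfl, fun h => h1 h.symm, Or.inl h2⟩
    · simp only [beq_iff_eq] at h1
      simp only [Bool.and_eq_true, beq_iff_eq, bne_iff_ne] at h3
      simp only [true_iff]
      exact ⟨t, Or.inl rfl, fun h => h1 h.symm, Or.inr (Or.inl h3.1)⟩
    · -- parts.length == 2, inner hit
      simp only [beq_iff_eq] at h1 h4
      simp only [Bool.and_eq_true, beq_iff_eq, bne_iff_ne] at h5
      simp only [true_iff]
      exact ⟨t, Or.inl rfl, fun h => h1 h.symm,
        Or.inr (Or.inr ⟨h4, h5.1.1, h5.1.2, h5.2⟩)⟩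
    · -- parts.length == 2, inner miss: head contributes nothing
      simp only [beq_iff_eq] at h1 h2 h4
      simp only [Bool.and_eq_true, beq_iff_eq, bne_iff_ne, not_and, not_not] at h3 h5
      rw [ih]
      constructor
      · rintro ⟨u, hu, hs⟩; exact ⟨u, Or.inr hu, hs⟩
      · rintro ⟨u, hu | hu, hs⟩
        · subst hu
          rcases hs with ⟨hne, hc1 | hc2 | hc3⟩
          · exact absurd hc1 h2
          · exact absurd (h3 hc2).symm hne
          · exact absurd (h5 ⟨hc3.2.1, hc3.2.2.1⟩) hc3.2.2.2
        · exact ⟨u, hu, hs⟩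
    · -- parts.length ≠ 2: head contributes only via c1/c2
      simp only [beq_iff_eq] at h1 h2 h4
      simp only [Bool.and_eq_true, beq_iff_eq, bne_iff_ne, not_and, not_not] at h3
      rw [ih]
      constructor
      · rintro ⟨u, hu, hs⟩; exact ⟨u, Or.inr hu, hs⟩
      · rintro ⟨u, hu | hu, hs⟩
        · subst hu
          rcases hs with ⟨hne, hc1 | hc2 | hc3⟩
          · exact absurd hc1 h2
          · exact absurd (h3 hc2).symm hne
          · exact absurd hc3.1 h4
        · exact ⟨u, hu, hs⟩

lemma alt_iff (name : String) (ts : List String) :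
    is_name_spoof_py_alt name ts = true ↔ ∃ t ∈ ts, Spoofs name t := by
  unfold is_name_spoof_py_alt
  dsimp only
  split_ifs with hemp hc1 hc2 hlen
  · rw [List.isEmpty_iff] at hemp; subst hemp; simp
  · -- dash-stripped form of name found among the others
    rw [PySem.Set.contains_iff, PySem.Set.mem_ofList] at hc1
    simp only [List.mem_map, List.mem_filter, bne_iff_ne] at hc1
    obtain ⟨t, ⟨ht, hne⟩, heq⟩ := hc1
    simp only [true_iff]
    exact ⟨t, ht, by simpa using hne, Or.inl heq.symm⟩
  · -- underscore→dash form found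
    rw [PySem.Set.contains_iff, PySem.Set.mem_ofList] at hc2
    simp only [List.mem_map, List.mem_filter, bne_iff_ne] at hc2
    obtain ⟨t, ⟨ht, hne⟩, heq⟩ := hc2
    simp only [true_iff]
    exact ⟨t, ht, by simpa using hne, Or.inr (Or.inl heq.symm)⟩
  · -- name is not a two-part path and the first two indexes missed
    rw [PySem.Set.contains_iff, PySem.Set.mem_ofList] at hc1 hc2
    simp only [List.mem_map, List.mem_filter, bne_iff_ne, not_exists, not_and] at hc1 hc2
    simp only [bne_iff_ne, ne_eq] at hlen
    simp only [false_iff, not_exists, not_and]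
    rintro t ht ⟨hne, hc | hc | hc⟩
    · exact hc1 t ⟨ht, by simpa using hne⟩ hc.symm
    · exact hc2 t ⟨ht, by simpa using hne⟩ hc.symm
    · exact hlen hc.1
  · -- two-part path: owner set minus name's own prefix
    rw [PySem.Set.contains_iff, PySem.Set.mem_ofList] at hc1 hc2
    simp only [List.mem_map, List.mem_filter, bne_iff_ne, not_exists, not_and] at hc1 hc2
    simp only [bne_iff_ne, ne_eq, not_not] at hlen
    rw [Bool.not_eq_true', List.isEmpty_eq_false_iff_exists_mem]
    constructor
    · rintro ⟨o, ho⟩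
      rw [PySem.Set.mem_diff, PySem.Set.mem_ofList, PySem.Set.mem_ofList] at ho
      obtain ⟨hoin, hout⟩ := ho
      simp only [List.mem_filterMap, List.mem_filter, bne_iff_ne] at hoin
      obtain ⟨t, ⟨ht, hne⟩, hg⟩ := hoin
      rw [Option.ite_none_right_eq_some] at hg
      simp only [Bool.and_eq_true, beq_iff_eq, Option.some.injEq] at hg
      obtain ⟨⟨htl, hts⟩, hto⟩ := hg
      simp only [List.mem_singleton] at hout
      exact ⟨t, ht, by simpa using hne,
        Or.inr (Or.inr ⟨hlen, htl, hts.symm, fun h => hout (h.trans hto).symm⟩)⟩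
    · rintro ⟨t, ht, hne, hc | hc | hc⟩
      · exact absurd (hc1 t ⟨ht, by simpa using hne⟩ hc.symm) (fun h => h)
      · exact absurd (hc2 t ⟨ht, by simpa using hne⟩ hc.symm) (fun h => h)
      · obtain ⟨hpl, htl, hts, hto⟩ := hc
        refine ⟨((PySem.Str.split? t "/").getD [])[0]!, ?_⟩
        rw [PySem.Set.mem_diff, PySem.Set.mem_ofList, PySem.Set.mem_ofList]
        constructor
        · simp only [List.mem_filterMap, List.mem_filter, bne_iff_ne]
          refine ⟨t, ⟨ht, by simpa using hne⟩, ?_⟩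
          rw [Option.ite_none_right_eq_some]
          simp only [Bool.and_eq_true, beq_iff_eq]
          exact ⟨⟨htl, hts.symm⟩, trivial⟩
        · simp only [List.mem_singleton]
          exact fun h => hto h.symm

-- ===== VERDICT (by name: the statement is the Claim_ definition above) =====
lemma a_iff (name : String) (ts : List String) :
    is_name_spoof_py name ts = true ↔ ∃ t ∈ ts, Spoofs name t := by
  unfold is_name_spoof_py
  split_ifs with hemp
  · rw [List.isEmpty_iff] at hemp; subst hemp; simp
  · exact isnLoopA_iff name ts

theorem is_name_spoof_py_spec : Claim_equal_is_name_spoof_py := by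
  intro name ts _
  unfold Spec_is_name_spoof_py
  rw [Bool.eq_iff_iff, a_iff, alt_iff]
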